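-- pv_equiv track=rewrite | github.com/JoseB007/API_juan_Valdez | app/domain/services/nucleo/soporte_unificador.py | resolver_estado
-- ===== SOURCE A (Python) =====
-- from typing import List, Dict, Set
--
-- def resolver_estado(resultados: List[Dict]) -> str:
--     if not resultados:
--         return "procesando"
--
--     estados = [r.get("estado") for r in resultados]
--
--     if "procesando" in estados:
--         return "procesando"
--     if "no_encontrado" in estados:
--         return "no_encontrado"
--     if "encontrado" in estados:
--         return "encontrado"
--     if "error" in estados:
--         return "error"
--
--     return "procesando"
-- ===== SOURCE B (Python) =====
-- from typing import List, Dict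
--
-- _RANK = {"procesando": 0, "no_encontrado": 1, "encontrado": 2, "error": 3}
-- _NAME = ["procesando", "no_encontrado", "encontrado", "error"]
--
-- def resolver_estado(resultados: List[Dict]) -> str:
--     best = None
--     for r in resultados:
--         k = _RANK.get(r.get("estado"))
--         if k is not None and (best is None or k < best):
--             best = k
--     return _NAME[best] if best is not None else "procesando"
-- ===== Notes on version B (the rewrite author's own statement) =====
-- stated objective: alternative
-- what changed: Replaces four sequential membership scans over the estados list with a single table-driven pass that keeps the minimum priority rank seen and maps it back to its state name.
import Mathlib
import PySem

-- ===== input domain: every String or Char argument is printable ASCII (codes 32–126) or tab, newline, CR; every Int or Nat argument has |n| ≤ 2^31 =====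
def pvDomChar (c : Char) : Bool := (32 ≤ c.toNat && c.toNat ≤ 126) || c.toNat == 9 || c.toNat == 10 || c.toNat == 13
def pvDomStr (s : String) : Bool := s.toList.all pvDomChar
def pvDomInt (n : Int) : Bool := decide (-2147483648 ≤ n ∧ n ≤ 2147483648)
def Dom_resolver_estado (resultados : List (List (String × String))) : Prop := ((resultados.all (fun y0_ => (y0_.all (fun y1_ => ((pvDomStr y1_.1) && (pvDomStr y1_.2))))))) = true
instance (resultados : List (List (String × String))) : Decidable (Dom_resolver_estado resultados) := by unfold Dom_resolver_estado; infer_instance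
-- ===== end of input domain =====

-- B replaces A's four sequential membership scans by one table-driven pass keeping the
-- minimum priority rank; same return value everywhere (objective: alternative).

-- r.get("estado"): first-match association-list lookup (shared primitive of both ports)
def pvGetEstado (r : List (String × String)) : Option String :=
  (r.find? (fun p => p.1 == "estado")).map (·.2)

-- ===== PORT A =====
def resolver_estado (resultados : List (List (String × String))) : String :=
  if resultados = [] then "procesando"
  else
    let estados := resultados.map pvGetEstado
    if estados.contains (some "procesando") then "procesando"
    else if estados.contains (some "no_encontrado") then "no_encontrado"
    else if estados.contains (some "encontrado") then "encontrado"
    else if estados.contains (some "error") then "error"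
    else "procesando"

-- ===== PORT B =====
-- _RANK.get(r.get("estado"))
def pvRank (s : Option String) : Option Nat :=
  match s with
  | some "procesando" => some 0
  | some "no_encontrado" => some 1
  | some "encontrado" => some 2
  | some "error" => some 3
  | _ => none

def pvName (k : Nat) : String :=
  match k with
  | 0 => "procesando"
  | 1 => "no_encontrado"
  | 2 => "encontrado"
  | _ => "error"

def pvStep (best : Option Nat) (r : List (String × String)) : Option Nat :=
  match pvRank (pvGetEstado r) with
  | none => best
  | some k =>
    match best with
    | none => some k
    | some b => if k < b then some k else some b

def resolver_estado_alt (resultados : List (List (String × String))) : String :=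
  match resultados.foldl pvStep none with
  | some b => pvName b
  | none => "procesando"

-- ===== PRECONDITION & SPEC =====
def Spec_resolver_estado (resultados : List (List (String × String))) (out : String) : Prop := out = resolver_estado_alt resultados
instance (resultados : List (List (String × String))) (out : String) : Decidable (Spec_resolver_estado resultados out) := by unfold Spec_resolver_estado; infer_instance

-- ===== CLAIM (what is proved, stated in full; the proofs are below) =====
def Claim_equal_resolver_estado : Prop := ∀ (resultados : List (List (String × String))), Dom_resolver_estado resultados → Spec_resolver_estado resultados (resolver_estado resultados)

-- ===== LEMMAS AND PROOFS =====

-- min on Option Nat (none = +infinity)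
def pvOptMin (a b : Option Nat) : Option Nat :=
  match a, b with
  | none, b => b
  | a, none => a
  | some x, some y => some (min x y)

theorem pvStep_eq_optMin (best : Option Nat) (r : List (String × String)) :
    pvStep best r = pvOptMin best (pvRank (pvGetEstado r)) := by
  unfold pvStep pvOptMin
  cases pvRank (pvGetEstado r) with
  | none => cases best <;> rfl
  | some k =>
    cases best with
    | none => rfl
    | some b => by_cases h : k < b <;> simp [h, Nat.min_def]

theorem pvOptMin_assoc (a b c : Option Nat) :
    pvOptMin (pvOptMin a b) c = pvOptMin a (pvOptMin b c) := by
  cases a <;> cases b <;> cases c <;> simp [pvOptMin, Nat.min_assoc]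

theorem pvFold_acc (l : List (List (String × String))) (a : Option Nat) :
    l.foldl pvStep a = pvOptMin a (l.foldl pvStep none) := by
  induction l generalizing a with
  | nil => cases a <;> rfl
  | cons r t ih =>
    simp only [List.foldl_cons]
    rw [ih (pvStep a r), ih (pvStep none r), pvStep_eq_optMin, pvStep_eq_optMin,
        pvOptMin_assoc]
    rfl

-- characterisation of B's fold by the four membership tests A performs
theorem pvFold_char (l : List (List (String × String))) :
    l.foldl pvStep none =
      (if (l.map pvGetEstado).contains (some "procesando") then some 0
       else if (l.map pvGetEstado).contains (some "no_encontrado") then some 1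
       else if (l.map pvGetEstado).contains (some "encontrado") then some 2
       else if (l.map pvGetEstado).contains (some "error") then some 3
       else none) := by
  induction l with
  | nil => rfl
  | cons r t ih =>
    simp only [List.foldl_cons, List.map_cons, List.contains_cons]
    rw [pvFold_acc, pvStep_eq_optMin, ih]
    -- case on what pvGetEstado r is, via pvRank
    by_cases hp : pvGetEstado r = some "procesando"
    · simp [hp, pvRank, pvOptMin]; split_ifs <;> simp
    · by_cases hn : pvGetEstado r = some "no_encontrado"
      · simp [hn, pvRank, pvOptMin]; split_ifs <;> simp
      · by_cases he : pvGetEstado r = some "encontrado"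
        · simp [he, pvRank, pvOptMin]; split_ifs <;> simp
        · by_cases hr : pvGetEstado r = some "error"
          · simp [hr, pvRank, pvOptMin]; split_ifs <;> simp
          · have hrk : pvRank (pvGetEstado r) = none := by
              unfold pvRank; split <;> simp_all
            simp [hrk, pvOptMin, Ne.symm hp, Ne.symm hn, Ne.symm he, Ne.symm hr]

-- ===== VERDICT (by name: the statement is the Claim_ definition above) =====
theorem resolver_estado_spec : Claim_equal_resolver_estado := by
  intro resultados _
  unfold Spec_resolver_estado resolver_estado resolver_estado_alt
  rw [pvFold_char]
  by_cases hnil : resultados = []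
  · subst hnil; rfl
  · simp only [hnil, if_false]
    split_ifs <;> rfl
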